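-- pv_equiv track=rewrite | github.com/Livda/WorkHard | 5INFO/competition/codechef_SPIDY2.py | solve
-- ===== SOURCE A (Python) =====
-- def solve(tab):
--     energy = [-1 for x in range(len(tab))]
--     energy[0] = 0
--     for i in range(len(tab)):
--         j = 1
--         while i + j < len(tab):
--             testing = abs(tab[i] - tab[i+j])
--             value = energy[i] + testing
--             if energy[i+j] == -1 or energy[i+j] > value :
--                 energy[i+j] = value
--             j = j*2
--     return energy[-1]
-- ===== SOURCE B (Python) =====
-- def solve(tab):
--     # Dijkstra's algorithm on the power-of-two jump graph: repeatedly finalize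
--     # the cheapest tentative node and relax its outgoing jumps.
--     n = len(tab)
--     dist = [None] * n
--     dist[0] = 0
--     visited = [False] * n
--     while True:
--         u = -1
--         for v in range(n):
--             if not visited[v] and dist[v] is not None and (u == -1 or dist[v] < dist[u]):
--                 u = v
--         if u == -1:
--             break
--         visited[u] = True
--         j = 1
--         while u + j < n:
--             c = dist[u] + abs(tab[u] - tab[u + j])
--             if dist[u + j] is None or c < dist[u + j]:
--                 dist[u + j] = c
--             j *= 2
--     return dist[-1]
-- ===== Notes on version B (the rewrite author's own statement) =====
-- stated objective: alternative
-- what changed: Replaced A's index-order push DP over a -1-sentinel array by selection-based Dijkstra: a None-initialised distance array and a visited set, repeatedly finalising the unvisited node of minimum tentative distance and relaxing its power-of-two jumps, stopping when no tentative node remains.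
import Mathlib
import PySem

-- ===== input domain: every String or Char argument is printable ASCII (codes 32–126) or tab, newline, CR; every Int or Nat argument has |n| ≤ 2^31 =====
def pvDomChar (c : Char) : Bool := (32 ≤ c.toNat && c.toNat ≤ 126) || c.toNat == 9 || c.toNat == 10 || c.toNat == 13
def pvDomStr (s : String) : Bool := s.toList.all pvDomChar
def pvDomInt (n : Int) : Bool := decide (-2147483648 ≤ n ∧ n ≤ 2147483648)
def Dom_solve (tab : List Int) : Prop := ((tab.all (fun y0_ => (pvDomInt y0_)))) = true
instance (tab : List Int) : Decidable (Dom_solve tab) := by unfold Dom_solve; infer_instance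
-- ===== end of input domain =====

-- B replaces A's index-order push DP over a -1-sentinel array by selection-based
-- Dijkstra (visited set + None-sentinel tentative distances, finalize the cheapest
-- tentative node, relax its power-of-two jumps) — objective: alternative algorithm.

-- ===== PORT A =====
-- inner 'while i + j < len(tab)' loop of A, with j = 2^k (j = j*2 ↔ k := k+1)
def pvAinner (tab : List Int) (i : Nat) (k : Nat) (e : List Int) : List Int :=
  if _h : i + 2 ^ k < tab.length then
    let testing := |tab.getD i 0 - tab.getD (i + 2 ^ k) 0|
    let value := e.getD i 0 + testing
    let e' := if e.getD (i + 2 ^ k) 0 = -1 ∨ value < e.getD (i + 2 ^ k) 0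
              then e.set (i + 2 ^ k) value else e
    pvAinner tab i (k + 1) e'
  else e
termination_by tab.length - (i + 2 ^ k)
decreasing_by
  have h1 : 2 ^ k < 2 ^ (k + 1) := Nat.pow_lt_pow_succ (by norm_num)
  omega

def solve (tab : List Int) : Int :=
  -- 'energy[0] = 0' raises IndexError on the empty list: excluded by Pre_solve
  let e0 := (List.replicate tab.length (-1 : Int)).set 0 0
  let e := (List.range tab.length).foldl (fun e i => pvAinner tab i 0 e) e0
  (PySem.List.pyGet? e (-1)).getD 0

-- ===== PORT B =====
-- 'for v in range(n): if not visited[v] and dist[v] is not None and (u == -1 or dist[v] < dist[u]): u = v'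
-- (the '.getD 0' on dist[u] is exact: whenever u ≠ -1 the loop established dist[u] is not None)
def pvBstep (dist : List (Option Int)) (vis : List Bool) (u : Int) (v : Nat) : Int :=
  if vis.getD v false = false then
    match dist.getD v none with
    | none => u
    | some dv =>
      if u = -1 then (v : Int)
      else if dv < (dist.getD u.toNat none).getD 0 then (v : Int) else u
  else u

def pvBpick (dist : List (Option Int)) (vis : List Bool) : Int :=
  (List.range dist.length).foldl (pvBstep dist vis) (-1)

-- inner 'while u + j < n' relaxation loop, j = 2^k ('dist[u]' read as in Python: it is
-- not None whenever this loop runs, so '.getD 0' is exact)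
def pvBrelax (tab : List Int) (dist : List (Option Int)) (u : Nat) (k : Nat) :
    List (Option Int) :=
  if _h : u + 2 ^ k < tab.length then
    let c := (dist.getD u none).getD 0 + |tab.getD u 0 - tab.getD (u + 2 ^ k) 0|
    let d' := match dist.getD (u + 2 ^ k) none with
              | none => dist.set (u + 2 ^ k) (some c)
              | some old => if c < old then dist.set (u + 2 ^ k) (some c) else dist
    pvBrelax tab d' u (k + 1)
  else dist
termination_by tab.length - (u + 2 ^ k)
decreasing_by
  have h1 : 2 ^ k < 2 ^ (k + 1) := Nat.pow_lt_pow_succ (by norm_num)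
  omega

-- termination helper for the outer 'while True' loop: marking an unvisited index
-- visited strictly decreases the number of False entries (cited in decreasing_by)
theorem pvcount_set_true (vis : List Bool) (u : Nat) (hu : u < vis.length)
    (hf : vis.getD u false = false) :
    (vis.set u true).count false < vis.count false := by
  induction vis generalizing u with
  | nil => simp at hu
  | cons b r ih =>
    cases u with
    | zero =>
      simp only [List.getD, List.getElem?_cons_zero, Option.getD_some] at hf
      subst hf
      simp [List.set]
    | succ m =>
      have hm : m < r.length := by simpa using hu
      have hf' : r.getD m false = false := by simpa [List.getD] using hf
      have := ih m hm hf'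
      simp only [List.set, List.count_cons]
      omega

-- outer 'while True' loop of B.  The dfs guard '0 ≤ u ∧ u.toNat < vis.length ∧ …' is a
-- totality guard: it is equivalent to Python's 'u != -1' whenever vis and dist have the
-- same length, because pvBpick only returns -1 or an unvisited in-range index.
def pvBloop (tab : List Int) (dist : List (Option Int)) (vis : List Bool) :
    List (Option Int) :=
  let u := pvBpick dist vis
  if h : 0 ≤ u ∧ u.toNat < vis.length ∧ vis.getD u.toNat false = false then
    pvBloop tab (pvBrelax tab dist u.toNat 0) (vis.set u.toNat true)
  else dist
termination_by vis.count false
decreasing_by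
  exact pvcount_set_true vis _ h.2.1 h.2.2

def solve_alt (tab : List Int) : Int :=
  -- 'dist[0] = 0' raises IndexError on the empty list: excluded by Pre_solve
  let dist0 := (List.replicate tab.length (none : Option Int)).set 0 (some 0)
  let vis0 := List.replicate tab.length false
  let final := pvBloop tab dist0 vis0
  ((PySem.List.pyGet? final (-1)).getD none).getD 0

-- ===== PRECONDITION & SPEC =====
-- Pre_solve excludes only the empty list, on which A raises IndexError (energy[0] = 0).
def Pre_solve (tab : List Int) : Prop := tab ≠ []
instance (tab : List Int) : Decidable (Pre_solve tab) := by unfold Pre_solve; infer_instance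

def pvWitness_solve : List Int := [3, 10, 2, 4]

def Spec_solve (tab : List Int) (out : Int) : Prop := out = solve_alt tab
instance (tab : List Int) (out : Int) : Decidable (Spec_solve tab out) := by unfold Spec_solve; infer_instance

-- ===== CLAIM (what is proved, stated in full; the proofs are below) =====
def Claim_equal_solve : Prop := ∀ (tab : List Int), Dom_solve tab → Pre_solve tab → Spec_solve tab (solve tab)

-- ===== LEMMAS AND PROOFS =====

-- list getD/set helpers
theorem pvgetD_set_self {α : Type} (l : List α) (i : Nat) (v d : α) (h : i < l.length) :
    (l.set i v).getD i d = v := by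
  simp [List.getD, h]

theorem pvgetD_set_ne {α : Type} (l : List α) {i j : Nat} (v d : α) (h : i ≠ j) :
    (l.set i v).getD j d = l.getD j d := by
  simp [List.getD, List.getElem?_set_ne h]

theorem pvgetD_lt {α : Type} (l : List (Option α)) {t : Nat} {x : α}
    (h : l.getD t none = some x) : t < l.length := by
  by_contra hc
  rw [List.getD, List.getElem?_eq_none (by omega)] at h
  simp at h

-- python's min over a nonempty list of ints
def pvmin : List Int → Int
  | [] => 0
  | h :: r => r.foldl min h

theorem pvmin_eq_min? (l : List Int) (h : l ≠ []) : l.min? = some (pvmin l) := by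
  match l with
  | a :: r => rw [List.min?_cons', pvmin]

-- the ideal pull-DP energy table (pvE tab m = table for nodes 0..m) shared by both proofs
def pvcands (tab : List Int) (e : List Int) (t : Nat) : List Int :=
  (List.range (Nat.log2 t + 1)).map
    (fun k => e.getD (t - 2 ^ k) 0 + |tab.getD (t - 2 ^ k) 0 - tab.getD t 0|)

def pvE (tab : List Int) : Nat → List Int
  | 0 => [0]
  | m + 1 => pvE tab m ++ [pvmin (pvcands tab (pvE tab m) (m + 1))]

def pvval (tab : List Int) (t : Nat) : Int := (pvE tab t).getD t 0

theorem pvE_length (tab : List Int) (m : Nat) : (pvE tab m).length = m + 1 := by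
  induction m with
  | zero => rfl
  | succ m ih => simp [pvE, ih]

theorem pvE_getD (tab : List Int) {t m : Nat} (h : t ≤ m) :
    (pvE tab m).getD t 0 = pvval tab t := by
  induction m with
  | zero => interval_cases t; rfl
  | succ m ih =>
    rcases Nat.lt_or_ge t (m + 1) with h' | h'
    · rw [pvE]
      rw [List.getD_append _ _ _ _ (by rw [pvE_length]; omega)]
      exact ih (by omega)
    · have ht : t = m + 1 := by omega
      subst ht
      rw [pvval]

-- the candidate value coming to node t from predecessor t - 2^k
def pvf (tab : List Int) (t k : Nat) : Int :=
  pvval tab (t - 2 ^ k) + |tab.getD (t - 2 ^ k) 0 - tab.getD t 0|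

theorem pvval_succ (tab : List Int) (m : Nat) :
    pvval tab (m + 1) = pvmin ((List.range (Nat.log2 (m + 1) + 1)).map (pvf tab (m + 1))) := by
  rw [pvval, pvE]
  rw [List.getD_append_right _ _ _ _ (by rw [pvE_length])]
  rw [pvE_length, Nat.sub_self]
  simp only [List.getD, List.getElem?_cons_zero, Option.getD_some]
  congr 1
  rw [pvcands]
  refine List.map_congr_left (fun k hk => ?_)
  rw [pvE_getD tab (by have := Nat.one_le_two_pow (n := k); omega), pvf]

theorem pvval_nonneg (tab : List Int) : ∀ t, 0 ≤ pvval tab t := by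
  intro t
  induction t using Nat.strong_induction_on with
  | _ t ih =>
    match t with
    | 0 => exact le_refl 0
    | m + 1 =>
      rw [pvval_succ]
      set L := (List.range (Nat.log2 (m + 1) + 1)).map (pvf tab (m + 1)) with hL
      have hne : L ≠ [] := by simp [hL]
      have hmem : pvmin L ∈ L := List.min?_mem (pvmin_eq_min? L hne)
      rw [hL] at hmem
      rcases List.mem_map.mp hmem with ⟨k, _, hk⟩
      rw [← hk, pvf]
      have h1 : 0 ≤ pvval tab (m + 1 - 2 ^ k) :=
        ih _ (by have := Nat.one_le_two_pow (n := k); omega)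
      have h2 : (0 : Int) ≤ |tab.getD (m + 1 - 2 ^ k) 0 - tab.getD (m + 1) 0| := abs_nonneg _
      omega

theorem pvf_nonneg (tab : List Int) (t k : Nat) : 0 ≤ pvf tab t k := by
  have := pvval_nonneg tab (t - 2 ^ k)
  have := abs_nonneg (tab.getD (t - 2 ^ k) 0 - tab.getD t 0)
  rw [pvf]; omega

-- ===== A-side partial minima =====
-- pvK s m t: exponents k whose edge (t-2^k) → t has already been relaxed once A has
-- fully processed sources < s and, within source s, exponents < m.
def pvK (s m t : Nat) : List Nat :=
  (List.range (Nat.log2 t + 1)).filter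
    (fun k => decide (2 ^ k ≤ t ∧ (t - 2 ^ k < s ∨ (t - 2 ^ k = s ∧ k < m))))

def pvpartial (tab : List Int) (s m t : Nat) : Int :=
  (((pvK s m t).map (pvf tab t)).min?).getD (-1)

theorem pvK_zero (t : Nat) : pvK 0 0 t = [] := by
  rw [pvK]
  refine List.filter_eq_nil_iff.mpr (fun k _ => ?_)
  simp only [decide_eq_true_eq]
  omega

theorem pvpartial_zero (tab : List Int) (t : Nat) : pvpartial tab 0 0 t = -1 := by
  rw [pvpartial, pvK_zero]; rfl

theorem pvK_full (s m t : Nat) (ht : 1 ≤ t) (hts : t ≤ s) :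
    pvK s m t = List.range (Nat.log2 t + 1) := by
  rw [pvK]
  refine List.filter_eq_self.mpr (fun k hk => ?_)
  rw [List.mem_range] at hk
  have h2 : 2 ^ k ≤ t := (Nat.le_log2 (by omega)).mp (by omega)
  have h1 : 1 ≤ 2 ^ k := Nat.one_le_two_pow
  simp only [decide_eq_true_eq]
  omega

theorem pvpartial_final (tab : List Int) (s m t : Nat) (ht : 1 ≤ t) (hts : t ≤ s) :
    pvpartial tab s m t = pvval tab t := by
  rw [pvpartial, pvK_full s m t ht hts]
  match t, ht with
  | u + 1, _ =>
    rw [pvmin_eq_min? _ (by simp), Option.getD_some, pvval_succ]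

-- membership-level min? insertion lemma
theorem pvmin?_insert (l l' : List Int) (v : Int)
    (hmem : ∀ x, x ∈ l' ↔ x ∈ l ∨ x = v) :
    l'.min? = some (match l.min? with | none => v | some a => min a v) := by
  match hL : l.min? with
  | none =>
    have hl : l = [] := List.min?_eq_none_iff.mp hL
    subst hl
    show l'.min? = some v
    rw [List.min?_eq_some_iff]
    refine ⟨(hmem v).mpr (Or.inr rfl), fun b hb => ?_⟩
    rcases (hmem b).mp hb with h | h
    · simp at h
    · exact le_of_eq h.symm
  | some a =>
    have hmm := List.min?_eq_some_iff.mp hL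
    show l'.min? = some (min a v)
    rw [List.min?_eq_some_iff]
    constructor
    · rcases min_choice a v with h | h <;> rw [h]
      · exact (hmem a).mpr (Or.inl hmm.1)
      · exact (hmem v).mpr (Or.inr rfl)
    · intro b hb
      rcases (hmem b).mp hb with h | h
      · exact le_trans (min_le_left a v) (hmm.2 b h)
      · rw [h]; exact min_le_right a v

-- within source s, a step that relaxes t' = s + 2^m only changes entry t'
theorem pvK_skip (s m t : Nat) (hne : t ≠ s + 2 ^ m) : pvK s (m + 1) t = pvK s m t := by
  rw [pvK, pvK]
  refine List.filter_congr (fun k hk => ?_)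
  rw [decide_eq_decide]
  constructor
  · rintro ⟨h2, h | ⟨he, hm⟩⟩
    · exact ⟨h2, Or.inl h⟩
    · refine ⟨h2, Or.inr ⟨he, ?_⟩⟩
      rcases Nat.lt_or_ge k m with h' | h'
      · exact h'
      · exfalso
        have hk' : k = m := by omega
        subst hk'
        omega
  · rintro ⟨h2, h | ⟨he, hm⟩⟩
    · exact ⟨h2, Or.inl h⟩
    · exact ⟨h2, Or.inr ⟨he, by omega⟩⟩

theorem pvK_insert_mem (s m : Nat) (k : Nat) :
    k ∈ pvK s (m + 1) (s + 2 ^ m) ↔ k ∈ pvK s m (s + 2 ^ m) ∨ k = m := by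
  have hpow : 1 ≤ 2 ^ m := Nat.one_le_two_pow
  constructor
  · intro hk
    rw [pvK, List.mem_filter, List.mem_range, decide_eq_true_eq] at hk
    obtain ⟨hr, h2, hc⟩ := hk
    rcases hc with h | ⟨he, hm⟩
    · left; rw [pvK, List.mem_filter, List.mem_range, decide_eq_true_eq]
      exact ⟨hr, h2, Or.inl h⟩
    · right
      have : 2 ^ k = 2 ^ m := by omega
      exact Nat.pow_right_injective (by norm_num) this
  · intro hk
    rcases hk with hk | hk
    · rw [pvK, List.mem_filter, List.mem_range, decide_eq_true_eq] at hk ⊢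
      obtain ⟨hr, h2, hc⟩ := hk
      exact ⟨hr, h2, by omega⟩
    · subst hk
      rw [pvK, List.mem_filter, List.mem_range, decide_eq_true_eq]
      have hlog : k ≤ Nat.log2 (s + 2 ^ k) :=
        (Nat.le_log2 (by omega)).mpr (by omega)
      exact ⟨by omega, by omega, Or.inr ⟨by omega, by omega⟩⟩

-- the relaxation step of A, expressed on partial minima
theorem pvpartial_update (tab : List Int) (s m : Nat) :
    pvpartial tab s (m + 1) (s + 2 ^ m)
      = if pvpartial tab s m (s + 2 ^ m) = -1
           ∨ pvf tab (s + 2 ^ m) m < pvpartial tab s m (s + 2 ^ m)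
        then pvf tab (s + 2 ^ m) m else pvpartial tab s m (s + 2 ^ m) := by
  set t' := s + 2 ^ m with ht'
  have hmem : ∀ x, x ∈ (pvK s (m + 1) t').map (pvf tab t')
      ↔ x ∈ (pvK s m t').map (pvf tab t') ∨ x = pvf tab t' m := by
    intro x
    simp only [List.mem_map]
    constructor
    · rintro ⟨k, hk, rfl⟩
      rcases (pvK_insert_mem s m k).mp hk with h | h
      · exact Or.inl ⟨k, h, rfl⟩
      · subst h; exact Or.inr rfl
    · rintro (⟨k, hk, rfl⟩ | rfl)
      · exact ⟨k, (pvK_insert_mem s m k).mpr (Or.inl hk), rfl⟩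
      · exact ⟨m, (pvK_insert_mem s m m).mpr (Or.inr rfl), rfl⟩
  simp only [pvpartial]
  rw [pvmin?_insert _ _ _ hmem, Option.getD_some]
  cases hL : ((pvK s m t').map (pvf tab t')).min? with
  | none => simp
  | some a =>
    have ha : a ∈ (pvK s m t').map (pvf tab t') := List.min?_mem hL
    have hge : 0 ≤ a := by
      rcases List.mem_map.mp ha with ⟨k, _, hk⟩
      simpa [← hk] using pvf_nonneg tab t' k
    simp only [Option.getD_some]
    rw [min_def]
    split_ifs with h1 h2 <;> omega

-- when the inner loop exits (t < s + 2^m for all live t), source s is fully pushed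
theorem pvK_exit (s m t : Nat) (h : t < s + 2 ^ m) : pvK s m t = pvK (s + 1) 0 t := by
  rw [pvK, pvK]
  refine List.filter_congr (fun k hk => ?_)
  rw [List.mem_range] at hk
  rw [decide_eq_decide]
  constructor
  · rintro ⟨h2, hc | ⟨he, _⟩⟩
    · exact ⟨h2, Or.inl (by omega)⟩
    · exact ⟨h2, Or.inl (by omega)⟩
  · rintro ⟨h2, hc | ⟨_, hm⟩⟩
    · rcases Nat.lt_or_ge (t - 2 ^ k) s with h' | h'
      · exact ⟨h2, Or.inl h'⟩
      · have he : t - 2 ^ k = s := by omega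
        have hkm : k < m := by
          have : 2 ^ k < 2 ^ m := by omega
          exact (Nat.pow_lt_pow_iff_right (by norm_num)).mp this
        exact ⟨h2, Or.inr ⟨he, hkm⟩⟩
    · omega

-- the invariant carried through A's loops
def pvInv (tab : List Int) (s m : Nat) (e : List Int) : Prop :=
  e.length = tab.length ∧ e.getD 0 0 = 0 ∧
    ∀ t, 1 ≤ t → t < tab.length → e.getD t 0 = pvpartial tab s m t

theorem pvAinner_inv (tab : List Int) (s : Nat) (hs : s < tab.length) :
    ∀ fuel m e, tab.length - (s + 2 ^ m) ≤ fuel → pvInv tab s m e →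
      pvInv tab (s + 1) 0 (pvAinner tab s m e) := by
  intro fuel
  induction fuel with
  | zero =>
    intro m e hfuel hinv
    rw [pvAinner, dif_neg (by omega)]
    obtain ⟨hlen, h0, hrest⟩ := hinv
    refine ⟨hlen, h0, fun t ht htn => ?_⟩
    rw [hrest t ht htn, pvpartial, pvpartial, pvK_exit s m t (by omega)]
  | succ fuel ih =>
    intro m e hfuel hinv
    obtain ⟨hlen, h0, hrest⟩ := hinv
    rw [pvAinner]
    rcases Nat.lt_or_ge (s + 2 ^ m) tab.length with hcond | hcond
    · rw [dif_pos hcond]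
      have hpow : 1 ≤ 2 ^ m := Nat.one_le_two_pow
      have hm2 : 2 ^ m < 2 ^ (m + 1) := Nat.pow_lt_pow_succ (by norm_num)
      have hsrc : e.getD s 0 = pvval tab s := by
        match s with
        | 0 => rw [h0]; rfl
        | u + 1 =>
          rw [hrest (u + 1) (by omega) hs]
          exact pvpartial_final tab (u + 1) m (u + 1) (by omega) (le_refl _)
      have hval : e.getD s 0 + |tab.getD s 0 - tab.getD (s + 2 ^ m) 0|
          = pvf tab (s + 2 ^ m) m := by
        have hts : s + 2 ^ m - 2 ^ m = s := by omega
        rw [pvf, hts, hsrc]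
      have hold : e.getD (s + 2 ^ m) 0 = pvpartial tab s m (s + 2 ^ m) :=
        hrest _ (by omega) hcond
      refine ih (m + 1) _ (by omega) ?_
      rw [hold, hval]
      split_ifs with hupd
      · refine ⟨by rw [List.length_set, hlen], ?_, fun t ht htn => ?_⟩
        · rw [pvgetD_set_ne _ _ _ (by omega), h0]
        · rcases eq_or_ne t (s + 2 ^ m) with rfl | hne
          · rw [pvgetD_set_self _ _ _ _ (by rw [hlen]; omega), pvpartial_update, if_pos hupd]
          · rw [pvgetD_set_ne _ _ _ (by omega), hrest t ht htn,
                pvpartial, pvpartial, pvK_skip s m t hne]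
      · refine ⟨hlen, h0, fun t ht htn => ?_⟩
        rcases eq_or_ne t (s + 2 ^ m) with rfl | hne
        · rw [hold, pvpartial_update, if_neg hupd]
        · rw [hrest t ht htn, pvpartial, pvpartial, pvK_skip s m t hne]
    · rw [dif_neg (by omega)]
      refine ⟨hlen, h0, fun t ht htn => ?_⟩
      rw [hrest t ht htn, pvpartial, pvpartial, pvK_exit s m t (by omega)]

theorem pvOuter (tab : List Int) (hne : tab ≠ []) : ∀ s, s ≤ tab.length →
    pvInv tab s 0 ((List.range s).foldl (fun e i => pvAinner tab i 0 e)
      ((List.replicate tab.length (-1 : Int)).set 0 0)) := by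
  intro s
  induction s with
  | zero =>
    intro _
    have hlen0 : 0 < tab.length := List.length_pos_of_ne_nil hne
    simp only [List.range_zero, List.foldl_nil]
    refine ⟨by simp, ?_, fun t ht htn => ?_⟩
    · rw [pvgetD_set_self _ _ _ _ (by simpa using hlen0)]
    · rw [pvgetD_set_ne _ _ _ (show (0 : Nat) ≠ t by omega), pvpartial_zero]
      simp [List.getD, htn]
  | succ s ih =>
    intro hs
    rw [List.range_succ, List.foldl_append, List.foldl_cons, List.foldl_nil]
    exact pvAinner_inv tab s (by omega) _ 0 _ (le_refl _) (ih (by omega))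

theorem solve_eq (tab : List Int) (hne : tab ≠ []) : solve tab = pvval tab (tab.length - 1) := by
  have hlen0 : 0 < tab.length := List.length_pos_of_ne_nil hne
  obtain ⟨hlen, h0, hrest⟩ := pvOuter tab hne tab.length (le_refl _)
  rw [solve]
  set e := (List.range tab.length).foldl (fun e i => pvAinner tab i 0 e)
      ((List.replicate tab.length (-1 : Int)).set 0 0) with hE
  rw [PySem.List.pyGet?_neg_one, List.getLast?_eq_getElem?, hlen]
  have hgd : (e[tab.length - 1]?).getD 0 = e.getD (tab.length - 1) 0 := rfl
  rw [hgd]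
  rcases Nat.lt_or_ge (tab.length - 1) 1 with h1 | h1
  · have h2 : tab.length - 1 = 0 := by omega
    rw [h2, h0]
    rfl
  · rw [hrest (tab.length - 1) h1 (by omega),
        pvpartial_final tab tab.length 0 (tab.length - 1) h1 (by omega)]

-- ===== B-side: Dijkstra =====
-- edge weight
def pvw (tab : List Int) (i j : Nat) : Int := |tab.getD i 0 - tab.getD j 0|

-- the outer-loop invariant of B
def pvGood (tab : List Int) (dist : List (Option Int)) (vis : List Bool) : Prop :=
  dist.length = tab.length ∧ vis.length = tab.length ∧
  dist.getD 0 none = some 0 ∧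
  (∀ v, vis.getD v false = true → ∃ dv, dist.getD v none = some dv) ∧
  (∀ v k, vis.getD v false = true → v + 2 ^ k < tab.length →
      ∃ dv e, dist.getD v none = some dv ∧ dist.getD (v + 2 ^ k) none = some e ∧
        e ≤ dv + pvw tab v (v + 2 ^ k)) ∧
  (∀ t d, 1 ≤ t → dist.getD t none = some d →
      ∃ k, 2 ^ k ≤ t ∧ vis.getD (t - 2 ^ k) false = true ∧
        ∃ e, dist.getD (t - 2 ^ k) none = some e ∧ d = e + pvw tab (t - 2 ^ k) t) ∧
  (∀ x t dx dt, vis.getD x false = true → vis.getD t false = false →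
      dist.getD x none = some dx → dist.getD t none = some dt → dx ≤ dt)

-- what pvBpick returns: -1 iff no unvisited index carries a tentative distance;
-- otherwise an unvisited in-range index of minimal tentative distance
theorem pvBstep_vis (dist : List (Option Int)) (vis : List Bool) (u : Int) (v : Nat)
    (hv : vis.getD v false = true) : pvBstep dist vis u v = u := by
  unfold pvBstep; rw [hv]; simp

theorem pvBstep_none (dist : List (Option Int)) (vis : List Bool) (u : Int) (v : Nat)
    (hv : vis.getD v false = false) (hd : dist.getD v none = none) :
    pvBstep dist vis u v = u := by
  unfold pvBstep; rw [hv, hd]; rfl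

theorem pvBstep_some (dist : List (Option Int)) (vis : List Bool) (u : Int) (v : Nat)
    (dm : Int) (hv : vis.getD v false = false) (hd : dist.getD v none = some dm) :
    pvBstep dist vis u v
      = if u = -1 then (v : Int)
        else if dm < (dist.getD u.toNat none).getD 0 then (v : Int) else u := by
  unfold pvBstep; rw [hv, hd]; rfl

theorem pvBpick_spec (dist : List (Option Int)) (vis : List Bool) :
    (pvBpick dist vis = -1 ∧
      ∀ v, v < dist.length → vis.getD v false = false → dist.getD v none = none)
    ∨ (∃ (u : Nat) (du : Int), pvBpick dist vis = (u : Int) ∧ u < dist.length ∧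
        vis.getD u false = false ∧ dist.getD u none = some du ∧
        ∀ v dv, v < dist.length → vis.getD v false = false →
          dist.getD v none = some dv → du ≤ dv) := by
  have aux : ∀ m : Nat,
      (((List.range m).foldl (pvBstep dist vis) (-1) = -1 ∧
          ∀ v, v < m → vis.getD v false = false → dist.getD v none = none)
        ∨ (∃ (w : Nat) (dw : Int),
            (List.range m).foldl (pvBstep dist vis) (-1) = (w : Int) ∧ w < m ∧
            vis.getD w false = false ∧ dist.getD w none = some dw ∧
            ∀ v dv, v < m → vis.getD v false = false →
              dist.getD v none = some dv → dw ≤ dv)) := by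
    intro m
    induction m with
    | zero => exact Or.inl ⟨rfl, fun v hv => by omega⟩
    | succ m ih =>
      rw [List.range_succ, List.foldl_append, List.foldl_cons, List.foldl_nil]
      rcases ih with ⟨ha, hall⟩ | ⟨w, dw, ha, hwm, hwv, hwd, hmin⟩
      · rw [ha]
        cases hv : vis.getD m false with
        | true =>
          rw [pvBstep_vis dist vis (-1) m hv]
          refine Or.inl ⟨rfl, fun v hv1 hv2 => ?_⟩
          rcases Nat.lt_or_ge v m with h' | h'
          · exact hall v h' hv2
          · have hvm : v = m := by omega
            subst hvm; rw [hv] at hv2; simp at hv2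
        | false =>
          cases hd : dist.getD m none with
          | none =>
            rw [pvBstep_none dist vis (-1) m hv hd]
            refine Or.inl ⟨rfl, fun v hv1 hv2 => ?_⟩
            rcases Nat.lt_or_ge v m with h' | h'
            · exact hall v h' hv2
            · have hvm : v = m := by omega
              subst hvm; exact hd
          | some dm =>
            rw [pvBstep_some dist vis (-1) m dm hv hd, if_pos rfl]
            refine Or.inr ⟨m, dm, rfl, by omega, hv, hd, fun v dv hv1 hv2 hv3 => ?_⟩
            rcases Nat.lt_or_ge v m with h' | h'
            · exact absurd hv3 (by rw [hall v h' hv2]; simp)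
            · have hvm : v = m := by omega
              subst hvm; rw [hd] at hv3
              injection hv3 with h; omega
      · rw [ha]
        have hwne : ¬((w : Int) = -1) := by omega
        cases hv : vis.getD m false with
        | true =>
          rw [pvBstep_vis dist vis (w : Int) m hv]
          refine Or.inr ⟨w, dw, rfl, by omega, hwv, hwd, fun v dv hv1 hv2 hv3 => ?_⟩
          rcases Nat.lt_or_ge v m with h' | h'
          · exact hmin v dv h' hv2 hv3
          · have hvm : v = m := by omega
            subst hvm; rw [hv] at hv2; simp at hv2
        | false =>
          cases hd : dist.getD m none with
          | none =>
            rw [pvBstep_none dist vis (w : Int) m hv hd]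
            refine Or.inr ⟨w, dw, rfl, by omega, hwv, hwd, fun v dv hv1 hv2 hv3 => ?_⟩
            rcases Nat.lt_or_ge v m with h' | h'
            · exact hmin v dv h' hv2 hv3
            · have hvm : v = m := by omega
              subst hvm; rw [hd] at hv3; simp at hv3
          | some dm =>
            rw [pvBstep_some dist vis (w : Int) m dm hv hd, if_neg hwne,
               Int.toNat_natCast, hwd, Option.getD_some]
            by_cases hlt : dm < dw
            · rw [if_pos hlt]
              refine Or.inr ⟨m, dm, rfl, by omega, hv, hd, fun v dv hv1 hv2 hv3 => ?_⟩
              rcases Nat.lt_or_ge v m with h' | h'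
              · have := hmin v dv h' hv2 hv3; omega
              · have hvm : v = m := by omega
                subst hvm; rw [hd] at hv3
                injection hv3 with h; omega
            · rw [if_neg hlt]
              refine Or.inr ⟨w, dw, rfl, by omega, hwv, hwd, fun v dv hv1 hv2 hv3 => ?_⟩
              rcases Nat.lt_or_ge v m with h' | h'
              · exact hmin v dv h' hv2 hv3
              · have hvm : v = m := by omega
                subst hvm; rw [hd] at hv3
                injection hv3 with h; omega
  unfold pvBpick
  exact aux dist.length

-- the relax-loop invariant: vis already contains u; du = dist[u] is fixed
def pvRInv (tab : List Int) (u : Nat) (du : Int) (k : Nat)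
    (dist : List (Option Int)) (vis : List Bool) : Prop :=
  dist.length = tab.length ∧
  dist.getD u none = some du ∧
  (∀ v, vis.getD v false = true → ∃ dv, dist.getD v none = some dv ∧ dv ≤ du) ∧
  (∀ t dt, vis.getD t false = false → dist.getD t none = some dt → du ≤ dt) ∧
  dist.getD 0 none = some 0 ∧
  (∀ t d, 1 ≤ t → dist.getD t none = some d →
      ∃ k', 2 ^ k' ≤ t ∧ vis.getD (t - 2 ^ k') false = true ∧
        ∃ e, dist.getD (t - 2 ^ k') none = some e ∧ d = e + pvw tab (t - 2 ^ k') t) ∧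
  (∀ v k', vis.getD v false = true → v + 2 ^ k' < tab.length → (v = u → k' < k) →
      ∃ dv e, dist.getD v none = some dv ∧ dist.getD (v + 2 ^ k') none = some e ∧
        e ≤ dv + pvw tab v (v + 2 ^ k'))

theorem pvBrelax_good (tab : List Int) (u : Nat) (du : Int) (vis : List Bool)
    (hvl : vis.length = tab.length) (hvu : vis.getD u false = true) :
    ∀ fuel k dist, tab.length - (u + 2 ^ k) ≤ fuel → pvRInv tab u du k dist vis →
      pvGood tab (pvBrelax tab dist u k) vis := by
  have exit : ∀ k dist, tab.length ≤ u + 2 ^ k → pvRInv tab u du k dist vis →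
      pvGood tab dist vis := by
    intro k dist hcond hinv
    obtain ⟨h1, h2, h3, h4, h5, h6, h7⟩ := hinv
    refine ⟨h1, hvl, h5, fun v hv => (h3 v hv).imp (fun dv h => h.1), ?_, h6, ?_⟩
    · intro v k' hv hlt
      refine h7 v k' hv hlt ?_
      rintro rfl
      have hpk : 2 ^ k' < 2 ^ k := by omega
      exact (Nat.pow_lt_pow_iff_right (by norm_num)).mp hpk
    · intro x t dx dt hx ht hdx hdt
      obtain ⟨dv, hdv, hle⟩ := h3 x hx
      rw [hdx] at hdv
      injection hdv with hdv
      have := h4 t dt ht hdt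
      omega
  intro fuel
  induction fuel with
  | zero =>
    intro k dist hfuel hinv
    rw [pvBrelax, dif_neg (by omega)]
    exact exit k dist (by omega) hinv
  | succ fuel ih =>
    intro k dist hfuel hinv
    rw [pvBrelax]
    rcases Nat.lt_or_ge (u + 2 ^ k) tab.length with hcond | hcond
    swap
    · rw [dif_neg (by omega)]
      exact exit k dist (by omega) hinv
    rw [dif_pos hcond]
    obtain ⟨h1, h2, h3, h4, h5, h6, h7⟩ := hinv
    have hpow : 1 ≤ 2 ^ k := Nat.one_le_two_pow
    have hk2 : 2 ^ k < 2 ^ (k + 1) := Nat.pow_lt_pow_succ (by norm_num)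
    have hwnn : (0 : Int) ≤ |tab.getD u 0 - tab.getD (u + 2 ^ k) 0| := abs_nonneg _
    have htlt : u + 2 ^ k < dist.length := by omega
    have htu : u + 2 ^ k ≠ u := by omega
    have ht0 : u + 2 ^ k ≠ 0 := by omega
    rw [h2, Option.getD_some]
    -- helper: the updated-array invariant, used by both writing branches
    have hupd : ∀ old? , dist.getD (u + 2 ^ k) none = old? →
        vis.getD (u + 2 ^ k) false = false →
        (∀ e0, old? = some e0 → du + |tab.getD u 0 - tab.getD (u + 2 ^ k) 0| < e0) →
        pvRInv tab u du (k + 1)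
          (dist.set (u + 2 ^ k) (some (du + |tab.getD u 0 - tab.getD (u + 2 ^ k) 0|))) vis := by
      intro old? hd htv _
      set c := du + |tab.getD u 0 - tab.getD (u + 2 ^ k) 0| with hc
      have hvne : ∀ v, vis.getD v false = true → v ≠ u + 2 ^ k := by
        intro v hv he
        rw [he, htv] at hv
        cases hv
      refine ⟨by rw [List.length_set, h1], ?_, ?_, ?_, ?_, ?_, ?_⟩
      · rw [pvgetD_set_ne _ _ _ htu]
        exact h2
      · intro v hv
        rw [pvgetD_set_ne _ _ _ (Ne.symm (hvne v hv))]
        exact h3 v hv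
      · intro t dt ht hdt
        rcases eq_or_ne t (u + 2 ^ k) with rfl | hne
        · rw [pvgetD_set_self _ _ _ _ htlt] at hdt
          injection hdt with hdt
          omega
        · rw [pvgetD_set_ne _ _ _ (Ne.symm hne)] at hdt
          exact h4 t dt ht hdt
      · rw [pvgetD_set_ne _ _ _ ht0]
        exact h5
      · intro t d ht hdt
        rcases eq_or_ne t (u + 2 ^ k) with rfl | hne
        · rw [pvgetD_set_self _ _ _ _ htlt] at hdt
          injection hdt with hdt
          refine ⟨k, by omega, ?_, du, ?_, ?_⟩
          · rw [show u + 2 ^ k - 2 ^ k = u by omega]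
            exact hvu
          · rw [show u + 2 ^ k - 2 ^ k = u by omega,
                pvgetD_set_ne _ _ _ htu]
            exact h2
          · rw [show u + 2 ^ k - 2 ^ k = u by omega, ← hdt, hc, pvw]
        · rw [pvgetD_set_ne _ _ _ (Ne.symm hne)] at hdt
          obtain ⟨k', hk', hkv, e, he, hde⟩ := h6 t d ht hdt
          refine ⟨k', hk', hkv, e, ?_, hde⟩
          rw [pvgetD_set_ne _ _ _ (Ne.symm (hvne _ hkv))]
          exact he
      · intro v k'' hv hlt hcnd
        have hvne' := hvne v hv
        rcases eq_or_ne (v + 2 ^ k'') (u + 2 ^ k) with het | het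
        · rcases eq_or_ne v u with rfl | hvu'
          · have hpe : 2 ^ k'' = 2 ^ k := by omega
            have hkk : k'' = k :=
              Nat.pow_right_injective (by norm_num) hpe
            subst hkk
            refine ⟨du, c, ?_, ?_, ?_⟩
            · rw [pvgetD_set_ne _ _ _ htu]
              exact h2
            · rw [het, pvgetD_set_self _ _ _ _ htlt]
            · rw [hc, pvw]
          · obtain ⟨dv, e, hdv, he, hle⟩ :=
              h7 v k'' hv hlt (fun h => absurd h hvu')
            rw [het] at he
            rcases hd' : old? with _ | e0
            · rw [hd'] at hd
              rw [hd] at he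
              cases he
            · rw [hd'] at hd
              rw [hd] at he
              injection he with he
              refine ⟨dv, c, ?_, ?_, ?_⟩
              · rw [pvgetD_set_ne _ _ _ (Ne.symm hvne')]
                exact hdv
              · rw [het, pvgetD_set_self _ _ _ _ htlt]
              · have := ‹∀ e0, old? = some e0 → c < e0› e0 hd'
                omega
        · have hknd : v = u → k'' < k := by
            rintro rfl
            have : 2 ^ k'' ≠ 2 ^ k := by omega
            have hle' : k'' < k + 1 := hcnd rfl
            rcases Nat.lt_or_ge k'' k with h' | h'
            · exact h'
            · exact absurd (by omega : k'' = k) (fun h => this (by rw [h]))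
          obtain ⟨dv, e, hdv, he, hle⟩ := h7 v k'' hv hlt hknd
          refine ⟨dv, e, ?_, ?_, hle⟩
          · rw [pvgetD_set_ne _ _ _ (Ne.symm hvne')]
            exact hdv
          · rw [pvgetD_set_ne _ _ _ (Ne.symm het)]
            exact he
    cases hd : dist.getD (u + 2 ^ k) none with
    | none =>
      have htv : vis.getD (u + 2 ^ k) false = false := by
        cases hvt : vis.getD (u + 2 ^ k) false with
        | false => rfl
        | true =>
          obtain ⟨dv, hdv, _⟩ := h3 _ hvt
          rw [hd] at hdv
          cases hdv
      exact ih (k + 1) _ (by omega) (hupd none hd htv (fun e0 he0 => by cases he0))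
    | some old =>
      show pvGood tab
        (pvBrelax tab
          (if du + |tab.getD u 0 - tab.getD (u + 2 ^ k) 0| < old then
            dist.set (u + 2 ^ k) (some (du + |tab.getD u 0 - tab.getD (u + 2 ^ k) 0|))
          else dist) u (k + 1)) vis
      by_cases hlt : du + |tab.getD u 0 - tab.getD (u + 2 ^ k) 0| < old
      · rw [if_pos hlt]
        have htv : vis.getD (u + 2 ^ k) false = false := by
          cases hvt : vis.getD (u + 2 ^ k) false with
          | false => rfl
          | true =>
            obtain ⟨dv, hdv, hdu⟩ := h3 _ hvt
            rw [hd] at hdv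
            injection hdv with hdv
            omega
        exact ih (k + 1) _ (by omega)
          (hupd (some old) hd htv (fun e0 he0 => by injection he0 with h; omega))
      · rw [if_neg hlt]
        refine ih (k + 1) _ (by omega) ⟨h1, h2, h3, h4, h5, h6, ?_⟩
        intro v k'' hv hlt' hcnd
        rcases eq_or_ne v u with rfl | hvu'
        · rcases Nat.lt_or_ge k'' k with h' | h'
          · exact h7 _ k'' hv hlt' (fun _ => h')
          · have hkk : k'' = k := by
              have := hcnd rfl
              omega
            subst hkk
            exact ⟨du, old, h2, hd, by rw [pvw]; omega⟩
        · exact h7 v k'' hv hlt' (fun h => absurd h hvu')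

-- after the loop: every entry is the pull-DP value
theorem pvBloop_res (tab : List Int) : ∀ (vis : List Bool) (dist : List (Option Int)),
    pvGood tab dist vis →
      (pvBloop tab dist vis).length = tab.length ∧
      ∀ t, t < tab.length → (pvBloop tab dist vis).getD t none = some (pvval tab t) := by
  have hsetvis : ∀ (vis : List Bool) (u p : Nat), u < vis.length →
      vis.getD p false = true → (vis.set u true).getD p false = true := by
    intro vis u p hu hp
    rcases eq_or_ne u p with rfl | hne
    · rw [pvgetD_set_self _ _ _ _ hu]
    · rw [pvgetD_set_ne _ _ _ hne]
      exact hp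
  have main : ∀ (N : Nat) (vis : List Bool) (dist : List (Option Int)),
      vis.count false ≤ N → pvGood tab dist vis →
      (pvBloop tab dist vis).length = tab.length ∧
      ∀ t, t < tab.length → (pvBloop tab dist vis).getD t none = some (pvval tab t) := by
    intro N
    induction N with
    | zero =>
      intro vis dist hN hgood
      obtain ⟨g1, g2, g3, g4, g5, g6, g7⟩ := hgood
      rw [pvBloop]
      rcases pvBpick_spec dist vis with ⟨hpick, hnone⟩ | ⟨u, du, hpick, hul, huv, hud, hmin⟩
      · rw [dif_neg (by rw [hpick]; intro h; exact absurd h.1 (by norm_num))]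
        -- all indices are visited
        have hall : ∀ t, t < tab.length → vis.getD t false = true := by
          intro t
          induction t using Nat.strong_induction_on with
          | _ t iht =>
            intro htn
            cases hvt : vis.getD t false with
            | true => rfl
            | false =>
              exfalso
              have hnone' := hnone t (by omega) hvt
              match t, htn with
              | 0, _ => rw [g3] at hnone'; cases hnone'
              | m + 1, htn =>
                have hvm : vis.getD m false = true := iht m (by omega) (by omega)
                obtain ⟨dv, e, _, he, _⟩ := g5 m 0 hvm (by simpa using htn)
                rw [show m + 2 ^ 0 = m + 1 by simp] at he
                rw [hnone'] at he
                cases he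
        have hval : ∀ t, t < tab.length → dist.getD t none = some (pvval tab t) := by
          intro t
          induction t using Nat.strong_induction_on with
          | _ t iht =>
            intro htn
            match t, htn with
            | 0, _ =>
              rw [g3]
              rfl
            | m + 1, htn =>
              obtain ⟨d, hd⟩ := g4 (m + 1) (hall (m + 1) htn)
              obtain ⟨k, hk2, hkv, e, he, hde⟩ := g6 (m + 1) d (by omega) hd
              have hpow : 1 ≤ 2 ^ k := Nat.one_le_two_pow
              have hplt : m + 1 - 2 ^ k < tab.length := by omega
              rw [iht _ (by omega) hplt] at he
              injection he with he
              have hdk : d = pvf tab (m + 1) k := by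
                rw [pvf, he]
                rw [pvw] at hde
                exact hde
              have hmem : d ∈ (List.range (Nat.log2 (m + 1) + 1)).map (pvf tab (m + 1)) := by
                rw [List.mem_map]
                exact ⟨k, List.mem_range.mpr
                  (Nat.lt_succ_of_le ((Nat.le_log2 (Nat.succ_ne_zero m)).mpr hk2)),
                  hdk.symm⟩
              have hlb : ∀ x ∈ (List.range (Nat.log2 (m + 1) + 1)).map (pvf tab (m + 1)),
                  d ≤ x := by
                intro x hx
                rw [List.mem_map] at hx
                obtain ⟨k', hk', rfl⟩ := hx
                rw [List.mem_range] at hk'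
                have h2k : 2 ^ k' ≤ m + 1 := (Nat.le_log2 (by omega : m + 1 ≠ 0)).mp (by omega)
                have hq : m + 1 - 2 ^ k' + 2 ^ k' = m + 1 := by omega
                obtain ⟨dv, e', hdv, he', hle⟩ :=
                  g5 (m + 1 - 2 ^ k') k' (hall _ (lt_of_le_of_lt (Nat.sub_le _ _) htn))
                    (by rw [Nat.sub_add_cancel h2k]; exact htn)
                rw [hq] at he' hle
                rw [hd] at he'
                injection he' with he'
                have hqlt : m + 1 - 2 ^ k' < m + 1 := by
                  have := Nat.one_le_two_pow (n := k')
                  omega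
                rw [iht _ hqlt (lt_of_le_of_lt (Nat.sub_le _ _) htn)] at hdv
                injection hdv with hdv
                rw [pvf, hdv]
                rw [pvw] at hle
                omega
              have hminq : ((List.range (Nat.log2 (m + 1) + 1)).map (pvf tab (m + 1))).min?
                  = some d := List.min?_eq_some_iff.mpr ⟨hmem, hlb⟩
              rw [pvmin_eq_min? _ (by simp)] at hminq
              injection hminq with hminq
              rw [hd, pvval_succ, ← hminq]
        exact ⟨g1, hval⟩
      · exfalso
        have hcnt : 0 < vis.count false := by
          have hlt : u < vis.length := by omega
          have : vis[u] = false := by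
            have := huv
            rw [List.getD, List.getElem?_eq_getElem hlt] at this
            simpa using this
          have : false ∈ vis := by
            rw [← this]
            exact vis.getElem_mem hlt
          exact List.count_pos_iff.mpr this
        omega
    | succ N ih =>
      intro vis dist hN hgood
      obtain ⟨g1, g2, g3, g4, g5, g6, g7⟩ := hgood
      rw [pvBloop]
      rcases pvBpick_spec dist vis with ⟨hpick, hnone⟩ | ⟨u, du, hpick, hul, huv, hud, hmin⟩
      · rw [dif_neg (by rw [hpick]; intro h; exact absurd h.1 (by norm_num))]
        -- the pick loop found nothing tentative: same final-state argument as above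
        have hall : ∀ t, t < tab.length → vis.getD t false = true := by
          intro t
          induction t using Nat.strong_induction_on with
          | _ t iht =>
            intro htn
            cases hvt : vis.getD t false with
            | true => rfl
            | false =>
              exfalso
              have hnone' := hnone t (by omega) hvt
              match t, htn with
              | 0, _ => rw [g3] at hnone'; cases hnone'
              | m + 1, htn =>
                have hvm : vis.getD m false = true := iht m (by omega) (by omega)
                obtain ⟨dv, e, _, he, _⟩ := g5 m 0 hvm (by simpa using htn)
                rw [show m + 2 ^ 0 = m + 1 by simp] at he
                rw [hnone'] at he
                cases he
        have hval : ∀ t, t < tab.length → dist.getD t none = some (pvval tab t) := by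
          intro t
          induction t using Nat.strong_induction_on with
          | _ t iht =>
            intro htn
            match t, htn with
            | 0, _ =>
              rw [g3]
              rfl
            | m + 1, htn =>
              obtain ⟨d, hd⟩ := g4 (m + 1) (hall (m + 1) htn)
              obtain ⟨k, hk2, hkv, e, he, hde⟩ := g6 (m + 1) d (by omega) hd
              have hpow : 1 ≤ 2 ^ k := Nat.one_le_two_pow
              have hplt : m + 1 - 2 ^ k < tab.length := by omega
              rw [iht _ (by omega) hplt] at he
              injection he with he
              have hdk : d = pvf tab (m + 1) k := by
                rw [pvf, he]
                rw [pvw] at hde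
                exact hde
              have hmem : d ∈ (List.range (Nat.log2 (m + 1) + 1)).map (pvf tab (m + 1)) := by
                rw [List.mem_map]
                exact ⟨k, List.mem_range.mpr
                  (Nat.lt_succ_of_le ((Nat.le_log2 (Nat.succ_ne_zero m)).mpr hk2)),
                  hdk.symm⟩
              have hlb : ∀ x ∈ (List.range (Nat.log2 (m + 1) + 1)).map (pvf tab (m + 1)),
                  d ≤ x := by
                intro x hx
                rw [List.mem_map] at hx
                obtain ⟨k', hk', rfl⟩ := hx
                rw [List.mem_range] at hk'
                have h2k : 2 ^ k' ≤ m + 1 := (Nat.le_log2 (by omega : m + 1 ≠ 0)).mp (by omega)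
                have hq : m + 1 - 2 ^ k' + 2 ^ k' = m + 1 := by omega
                obtain ⟨dv, e', hdv, he', hle⟩ :=
                  g5 (m + 1 - 2 ^ k') k' (hall _ (lt_of_le_of_lt (Nat.sub_le _ _) htn))
                    (by rw [Nat.sub_add_cancel h2k]; exact htn)
                rw [hq] at he' hle
                rw [hd] at he'
                injection he' with he'
                have hqlt : m + 1 - 2 ^ k' < m + 1 := by
                  have := Nat.one_le_two_pow (n := k')
                  omega
                rw [iht _ hqlt (lt_of_le_of_lt (Nat.sub_le _ _) htn)] at hdv
                injection hdv with hdv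
                rw [pvf, hdv]
                rw [pvw] at hle
                omega
              have hminq : ((List.range (Nat.log2 (m + 1) + 1)).map (pvf tab (m + 1))).min?
                  = some d := List.min?_eq_some_iff.mpr ⟨hmem, hlb⟩
              rw [pvmin_eq_min? _ (by simp)] at hminq
              injection hminq with hminq
              rw [hd, pvval_succ, ← hminq]
        exact ⟨g1, hval⟩
      · have hulv : u < vis.length := by omega
        rw [dif_pos (by
          rw [hpick]
          exact ⟨by omega, by rw [Int.toNat_natCast]; omega,
            by rw [Int.toNat_natCast]; exact huv⟩)]
        rw [hpick, Int.toNat_natCast]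
        have hvl' : (vis.set u true).length = tab.length := by
          rw [List.length_set]; omega
        have hvu' : (vis.set u true).getD u false = true := pvgetD_set_self _ _ _ _ hulv
        have hrinv : pvRInv tab u du 0 dist (vis.set u true) := by
          refine ⟨g1, hud, ?_, ?_, g3, ?_, ?_⟩
          · intro v hv
            rcases eq_or_ne u v with rfl | hne
            · exact ⟨du, hud, le_refl du⟩
            · rw [pvgetD_set_ne _ _ _ hne] at hv
              obtain ⟨dv, hdv⟩ := g4 v hv
              exact ⟨dv, hdv, g7 v u dv du hv huv hdv hud⟩
          · intro t dt hvt hdt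
            rcases eq_or_ne u t with rfl | hne
            · rw [hvu'] at hvt; cases hvt
            · rw [pvgetD_set_ne _ _ _ hne] at hvt
              exact hmin t dt (pvgetD_lt dist hdt) hvt hdt
          · intro t d ht hdt
            obtain ⟨k', hk', hkv, e, he, hde⟩ := g6 t d ht hdt
            exact ⟨k', hk', hsetvis vis u _ hulv hkv, e, he, hde⟩
          · intro v k' hv hlt hcnd
            rcases eq_or_ne u v with rfl | hne
            · exact absurd (hcnd rfl) (by omega)
            · rw [pvgetD_set_ne _ _ _ hne] at hv
              exact g5 v k' hv hlt
        have hgood' : pvGood tab (pvBrelax tab dist u 0) (vis.set u true) :=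
          pvBrelax_good tab u du (vis.set u true) hvl' hvu'
            (tab.length) 0 dist (by omega) hrinv
        have hcnt : (vis.set u true).count false < vis.count false :=
          pvcount_set_true vis u hulv huv
        exact ih (vis.set u true) (pvBrelax tab dist u 0) (by omega) hgood'
  intro vis dist hgood
  exact main (vis.count false) vis dist (le_refl _) hgood

theorem solve_alt_eq (tab : List Int) (hne : tab ≠ []) :
    solve_alt tab = pvval tab (tab.length - 1) := by
  have hlen0 : 0 < tab.length := List.length_pos_of_ne_nil hne
  have hrepb : ∀ (n v : Nat), (List.replicate n false).getD v false = false := by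
    intro n v
    rw [List.getD, List.getElem?_replicate]
    split_ifs <;> rfl
  have hrepn : ∀ (n v : Nat), (List.replicate n (none : Option Int)).getD v none = none := by
    intro n v
    rw [List.getD, List.getElem?_replicate]
    split_ifs <;> rfl
  have hgood : pvGood tab ((List.replicate tab.length (none : Option Int)).set 0 (some 0))
      (List.replicate tab.length false) := by
    refine ⟨by simp, by simp, ?_, ?_, ?_, ?_, ?_⟩
    · rw [pvgetD_set_self _ _ _ _ (by simpa using hlen0)]
    · intro v hv
      rw [hrepb] at hv
      cases hv
    · intro v k hv
      rw [hrepb] at hv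
      cases hv
    · intro t d ht hdt
      rw [pvgetD_set_ne _ _ _ (by omega : (0 : Nat) ≠ t), hrepn] at hdt
      cases hdt
    · intro x t dx dt hx
      rw [hrepb] at hx
      cases hx
  obtain ⟨hflen, hfval⟩ := pvBloop_res tab (List.replicate tab.length false)
    ((List.replicate tab.length (none : Option Int)).set 0 (some 0)) hgood
  rw [solve_alt]
  set final := pvBloop tab ((List.replicate tab.length (none : Option Int)).set 0 (some 0))
    (List.replicate tab.length false) with hfin
  have hv := hfval (tab.length - 1) (by omega)
  rw [PySem.List.pyGet?_neg_one, List.getLast?_eq_getElem?, hflen]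
  have hlt : tab.length - 1 < final.length := by omega
  rw [List.getD, List.getElem?_eq_getElem hlt] at hv
  rw [List.getElem?_eq_getElem hlt]
  simp only [Option.getD_some] at hv ⊢
  rw [hv]
  rfl

-- ===== VERDICT (by name: the statement is the Claim_ definition above) =====
theorem solve_spec : Claim_equal_solve := by
  intro tab _ hpre
  unfold Spec_solve
  rw [solve_alt_eq tab hpre, solve_eq tab hpre]
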